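-- pv_equiv track=rewrite | github.com/Venkatavignesh15/50-days-DSA-Challenge | Code26.py | processRequestQueueOperations
-- ===== SOURCE A (Python) =====
-- def processRequestQueueOperations(operations, values):
--     instack=[]
--     outstack=[]
--     result=[]
--     for i in range(len(operations)):
--         if operations[i]=="enqueue":
--             instack.append(values[i])
--
--         elif operations[i]=="dequeue":
--             if outstack:
--                 result.append(outstack.pop())
--             elif not outstack:
--                 while instack:
--                     outstack.append(instack.pop())
--                 result.append(outstack.pop())
--
--         elif operations[i]=="size":
--             siz=len(instack)+len(outstack)
--             result.append(siz)
--
--         elif operations[i]=="peek":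
--             if not outstack:
--                 while instack:
--                     outstack.append(instack.pop())
--                 result.append(outstack[-1])
--             elif outstack:
--                 result.append(outstack[-1])
--     return result
-- ===== SOURCE B (Python) =====
-- def processRequestQueueOperations(operations, values):
--     queue = []
--     result = []
--     for i, op in enumerate(operations):
--         if op == "enqueue":
--             queue.append(values[i])
--         elif op == "dequeue":
--             result.append(queue.pop(0))
--         elif op == "size":
--             result.append(len(queue))
--         elif op == "peek":
--             result.append(queue[0])
--     return result
-- ===== Notes on version B (the rewrite author's own statement) =====
-- stated objective: simpler
-- what changed: Replaces the two-stack queue simulation (instack/outstack with transfer while-loops and refill branches) by one direct FIFO list: append at the back, pop/read the front; the transfer loops and the outstack-empty branching disappear.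
import Mathlib
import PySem

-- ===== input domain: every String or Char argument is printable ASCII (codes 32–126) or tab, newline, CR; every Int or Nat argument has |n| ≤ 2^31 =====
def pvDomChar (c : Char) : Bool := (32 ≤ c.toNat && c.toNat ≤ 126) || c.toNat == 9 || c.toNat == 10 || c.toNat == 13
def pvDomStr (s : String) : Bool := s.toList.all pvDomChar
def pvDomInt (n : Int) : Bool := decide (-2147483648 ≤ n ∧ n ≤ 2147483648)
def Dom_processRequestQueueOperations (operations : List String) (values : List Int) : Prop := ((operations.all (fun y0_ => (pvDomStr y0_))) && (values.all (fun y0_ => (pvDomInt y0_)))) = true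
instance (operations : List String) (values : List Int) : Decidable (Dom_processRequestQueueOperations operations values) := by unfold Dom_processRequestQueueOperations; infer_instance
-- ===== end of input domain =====

-- B replaces A's two-stack queue simulation by a single direct FIFO list (simpler: no transfer loops).


-- ===== PORT A =====
-- stacks encoded with the top at the HEAD of the list (push = cons, pop = head/tail);
-- Python's outstack[-1] (the top) is therefore the head.
-- 'while instack: outstack.append(instack.pop())'
def pyTransfer : List Int → List Int → List Int × List Int
  | [], outs => ([], outs)
  | x :: rest, outs => pyTransfer rest (x :: outs)

-- one iteration of the for-loop body of A (i is the loop index from range(len(operations)))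
def aStep (operations : List String) (values : List Int)
    (st : List Int × List Int × List Int) (i : Int) : List Int × List Int × List Int :=
  let instack := st.1
  let outstack := st.2.1
  let result := st.2.2
  if PySem.List.pyGetD operations i "" = "enqueue" then
    (PySem.List.pyGetD values i 0 :: instack, outstack, result)
  else if PySem.List.pyGetD operations i "" = "dequeue" then
    if outstack ≠ [] then
      (instack, outstack.tail, result ++ [outstack.headD 0])
    else
      let p := pyTransfer instack outstack
      (p.1, p.2.tail, result ++ [p.2.headD 0])
  else if PySem.List.pyGetD operations i "" = "size" then
    (instack, outstack, result ++ [((instack.length + outstack.length : Nat) : Int)])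
  else if PySem.List.pyGetD operations i "" = "peek" then
    if outstack = [] then
      let p := pyTransfer instack outstack
      (p.1, p.2, result ++ [p.2.headD 0])
    else
      (instack, outstack, result ++ [outstack.headD 0])
  else
    (instack, outstack, result)

def processRequestQueueOperations (operations : List String) (values : List Int) : List Int :=
  ((PySem.List.pyRange 0 operations.length 1).foldl (aStep operations values) ([], [], [])).2.2

-- ===== PORT B =====
-- one iteration of B's for-loop body: a single FIFO queue (front at the head, append at the back)
def bStep (values : List Int) (st : List Int × List Int) (p : Int × String) : List Int × List Int :=
  let queue := st.1
  let result := st.2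
  if p.2 = "enqueue" then (queue ++ [PySem.List.pyGetD values p.1 0], result)
  else if p.2 = "dequeue" then (queue.tail, result ++ [queue.headD 0])
  else if p.2 = "size" then (queue, result ++ [((queue.length : Nat) : Int)])
  else if p.2 = "peek" then (queue, result ++ [queue.headD 0])
  else (queue, result)

def processRequestQueueOperations_alt (operations : List String) (values : List Int) : List Int :=
  ((PySem.List.enumerate operations 0).foldl (bStep values) ([], [])).2

-- ===== PRECONDITION & SPEC =====
-- Pre_ excludes exactly the inputs on which Python A raises IndexError: an 'enqueue' at a
-- position with no value in `values`, or a 'dequeue'/'peek' while the simulated queue is empty.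
def Pre_processRequestQueueOperations (operations : List String) (values : List Int) : Prop :=
  ∀ i < operations.length,
    (operations.getD i "" = "enqueue" → i < values.length) ∧
    ((operations.getD i "" = "dequeue" ∨ operations.getD i "" = "peek") →
      (operations.take i).count "dequeue" < (operations.take i).count "enqueue")
instance (operations : List String) (values : List Int) : Decidable (Pre_processRequestQueueOperations operations values) := by unfold Pre_processRequestQueueOperations; infer_instance

def pvWitness_processRequestQueueOperations : List String × List Int :=
  (["enqueue", "peek", "dequeue", "size"], [5, 0, 0, 0])

def Spec_processRequestQueueOperations (operations : List String) (values : List Int) (out : List Int) : Prop := out = processRequestQueueOperations_alt operations values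
instance (operations : List String) (values : List Int) (out : List Int) : Decidable (Spec_processRequestQueueOperations operations values out) := by unfold Spec_processRequestQueueOperations; infer_instance

-- ===== CLAIM (what is proved, stated in full; the proofs are below) =====
def Claim_equal_processRequestQueueOperations : Prop := ∀ (operations : List String) (values : List Int), Dom_processRequestQueueOperations operations values → Pre_processRequestQueueOperations operations values → Spec_processRequestQueueOperations operations values (processRequestQueueOperations operations values)

-- ===== LEMMAS AND PROOFS =====

theorem pyTransfer_eq (ins outs : List Int) : pyTransfer ins outs = ([], ins.reverse ++ outs) := by
  induction ins generalizing outs with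
  | nil => simp [pyTransfer]
  | cons x rest ih => simp [pyTransfer, ih]

-- the loop invariant: B's queue is A's outstack followed by A's reversed instack;
-- results are equal; both loops walk the same index range.
theorem loop_eq (values : List Int) (tail pre : List String)
    (ins outs res : List Int) :
    ((PySem.List.pyRange pre.length (pre ++ tail).length 1).foldl
        (aStep (pre ++ tail) values) (ins, outs, res)).2.2
      = ((PySem.List.enumerate tail (pre.length : Int)).foldl (bStep values)
          (outs ++ ins.reverse, res)).2 := by
  induction tail generalizing pre ins outs res with
  | nil =>
      rw [PySem.List.pyRange_one_eq_nil (by simp)]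
      simp [PySem.List.enumerate]
  | cons op rest ih =>
      have hlt : (pre.length : Int) < ((pre ++ op :: rest).length : Int) := by
        simp
      rw [PySem.List.pyRange_one_cons hlt, PySem.List.enumerate_cons]
      simp only [List.foldl_cons]
      have hop : PySem.List.pyGetD (pre ++ op :: rest) (pre.length : Int) "" = op := by
        rw [PySem.List.pyGetD_natCast]
        simp [List.getD]
      have hassoc : ∀ (p : List String), pre ++ op :: rest = (pre ++ [op]) ++ rest := by
        simp
      have hlen1 : ((pre ++ [op]).length : Int) = (pre.length : Int) + 1 := by simp
      have key : ∀ (ins' outs' res' : List Int),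
          ((PySem.List.pyRange ((pre.length : Int) + 1) ((pre ++ op :: rest).length) 1).foldl
              (aStep (pre ++ op :: rest) values) (ins', outs', res')).2.2
            = ((PySem.List.enumerate rest ((pre.length : Int) + 1)).foldl (bStep values)
                (outs' ++ ins'.reverse, res')).2 := by
        intro ins' outs' res'
        have := ih (pre ++ [op]) ins' outs' res'
        rw [hlen1] at this
        rw [hassoc rest]
        simpa using this
      by_cases he : op = "enqueue"
      · subst he
        simp only [aStep, bStep, hop, String.reduceEq, reduceIte]
        rw [key]
        simp
      · by_cases hd : op = "dequeue"
        · subst hd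
          simp only [aStep, bStep, hop, String.reduceEq, reduceIte, ne_eq]
          cases outs with
          | nil =>
              simp only [not_true_eq_false, if_false, pyTransfer_eq]
              rw [key]
              simp
          | cons o os =>
              simp only [reduceCtorEq, not_false_eq_true, if_true]
              rw [key]
              simp
        · by_cases hs : op = "size"
          · subst hs
            simp only [aStep, bStep, hop, String.reduceEq, reduceIte]
            rw [key]
            have : ((ins.length + outs.length : Nat) : Int)
                = (((outs ++ ins.reverse).length : Nat) : Int) := by
              simp; omega
            rw [this]
          · by_cases hp : op = "peek"
            · subst hp
              simp only [aStep, bStep, hop, String.reduceEq, reduceIte]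
              cases outs with
              | nil =>
                  simp only [reduceIte, pyTransfer_eq]
                  rw [key]
                  simp
              | cons o os =>
                  simp only [reduceCtorEq, if_false]
                  rw [key]
                  simp
            · simp only [aStep, bStep, hop, he, hd, hs, hp, if_false]
              rw [key]
-- ===== VERDICT (by name: the statement is the Claim_ definition above) =====
theorem processRequestQueueOperations_spec : Claim_equal_processRequestQueueOperations := by
  intro operations values _ _
  unfold Spec_processRequestQueueOperations processRequestQueueOperations processRequestQueueOperations_alt
  have := loop_eq values operations [] [] [] []
  simpa using this
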